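-- pv_equiv track=rewrite | github.com/ramitch91/checkio | solutions/Electronic Station/acceptable_password_vi.py | count_different_characters
-- ===== SOURCE A (Python) =====
-- def count_different_characters(password: str) -> bool:
--     diff_characters = []
--     for character in password:
--         if character not in diff_characters:
--             diff_characters.append(character)
--     if len(diff_characters) >= 3:
--         return True
--     return False
-- ===== SOURCE B (Python) =====
-- def count_different_characters(password: str) -> bool:
--     chars = sorted(password)
--     distinct = (1 if chars else 0) + sum(1 for a, b in zip(chars, chars[1:]) if a != b)
--     return distinct >= 3
-- ===== Notes on version B (the rewrite author's own statement) =====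
-- stated objective: alternative
-- what changed: Replaces the quadratic build-a-list-with-membership-scans loop by sorting the characters and counting distinct ones in a single adjacent-comparison pass over the sorted list.
import Mathlib
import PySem

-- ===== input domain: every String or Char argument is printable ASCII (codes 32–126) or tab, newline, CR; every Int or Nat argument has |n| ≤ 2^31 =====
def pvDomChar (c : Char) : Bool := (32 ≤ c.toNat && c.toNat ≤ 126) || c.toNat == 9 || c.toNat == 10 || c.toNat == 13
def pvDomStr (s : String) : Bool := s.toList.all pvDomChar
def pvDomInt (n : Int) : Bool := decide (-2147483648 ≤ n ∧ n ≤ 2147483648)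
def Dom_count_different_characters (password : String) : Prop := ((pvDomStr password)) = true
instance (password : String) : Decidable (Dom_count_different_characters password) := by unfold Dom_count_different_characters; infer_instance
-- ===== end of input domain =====

-- B replaces A's quadratic membership-scan accumulation by sort + one adjacent-comparison pass (alternative algorithm; return value only).

-- ===== PORT A =====
-- build diff_characters by appending each character not yet present, then test len >= 3
def count_different_characters (password : String) : Bool :=
  let diff_characters :=
    password.toList.foldl (fun acc character => if character ∈ acc then acc else acc ++ [character]) []
  if 3 ≤ diff_characters.length then true else false

-- ===== PORT B =====
-- sorted(password); distinct = (1 if nonempty) + count of adjacent unequal pairs (zip chars chars[1:]); return distinct >= 3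
def count_different_characters_alt (password : String) : Bool :=
  let chars := PySem.List.sorted password.toList (fun c => c) false
  let distinct : Int :=
    (if chars.isEmpty then 0 else 1) +
      ((chars.zip (PySem.List.slice chars (some 1) none)).countP (fun p => p.1 ≠ p.2) : Int)
  decide (3 ≤ distinct)

-- ===== PRECONDITION & SPEC =====
def Spec_count_different_characters (password : String) (out : Bool) : Prop := out = count_different_characters_alt password
instance (password : String) (out : Bool) : Decidable (Spec_count_different_characters password out) := by unfold Spec_count_different_characters; infer_instance

-- ===== CLAIM (what is proved, stated in full; the proofs are below) =====
def Claim_equal_count_different_characters : Prop := ∀ (password : String), Dom_count_different_characters password → Spec_count_different_characters password (count_different_characters password)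

-- ===== LEMMAS AND PROOFS =====

-- A's accumulator stays duplicate-free
theorem pvA_nodup (l : List Char) (acc : List Char) (h : acc.Nodup) :
    (l.foldl (fun acc character => if character ∈ acc then acc else acc ++ [character]) acc).Nodup := by
  induction l generalizing acc with
  | nil => exact h
  | cons c t ih =>
    simp only [List.foldl_cons]
    by_cases hc : c ∈ acc
    · simp [hc, ih _ h]
    · simp only [hc, if_false]
      refine ih _ ?_
      rw [List.nodup_append]
      refine ⟨h, List.nodup_singleton c, ?_⟩
      intro a ha b hb heq
      rw [List.mem_singleton] at hb
      subst hb
      exact hc (heq ▸ ha)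

-- membership in A's accumulator
theorem pvA_mem (l : List Char) (acc : List Char) (x : Char) :
    x ∈ l.foldl (fun acc character => if character ∈ acc then acc else acc ++ [character]) acc ↔
      x ∈ acc ∨ x ∈ l := by
  induction l generalizing acc with
  | nil => simp
  | cons c t ih =>
    simp only [List.foldl_cons]
    by_cases hc : c ∈ acc
    · rw [if_pos hc, ih]
      constructor
      · rintro (h | h) <;> simp_all
      · rintro (h | h)
        · exact Or.inl h
        · rcases List.mem_cons.mp h with h | h
          · exact Or.inl (h ▸ hc)
          · exact Or.inr h
    · rw [if_neg hc, ih]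
      simp [or_assoc, or_comm, List.mem_append]
      tauto

-- A's diff_characters length is the number of distinct characters
theorem pvA_length (l : List Char) :
    (l.foldl (fun acc character => if character ∈ acc then acc else acc ++ [character]) []).length
      = l.toFinset.card := by
  have hnd := pvA_nodup l [] List.nodup_nil
  have hm : (l.foldl (fun acc character => if character ∈ acc then acc else acc ++ [character]) []).toFinset = l.toFinset := by
    ext x
    simp [List.mem_toFinset, pvA_mem]
  rw [← hm, List.toFinset_card_of_nodup hnd]

-- B's adjacent-pair count on a sorted list counts the distinct characters
theorem pvB_count (cs : List Char) (hs : cs.Pairwise (· ≤ ·)) :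
    ((if cs.isEmpty then 0 else 1) + (cs.zip cs.tail).countP (fun p => p.1 ≠ p.2)) = cs.toFinset.card := by
  induction cs with
  | nil => simp
  | cons x t ih =>
    cases t with
    | nil => simp
    | cons y u =>
      have hyt : (y :: u).Pairwise (· ≤ ·) := (List.pairwise_cons.mp hs).2
      have hxy : x ≤ y := (List.pairwise_cons.mp hs).1 y (by simp)
      have ihr := ih hyt
      simp only [List.tail_cons, List.zip_cons_cons, List.countP_cons] at *
      by_cases hxe : x = y
      · subst hxe
        have : insert x (insert x u.toFinset) = insert x u.toFinset := by simp
        simp only [List.toFinset_cons, this, List.isEmpty_cons] at *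
        simpa using ihr
      · have hxnot : x ∉ (y :: u) := by
          intro hmem
          rcases List.mem_cons.mp hmem with h | h
          · exact hxe h
          · have := (List.pairwise_cons.mp hyt).1 x h
            have h2 := (List.pairwise_cons.mp hs).1 x (List.mem_cons_of_mem _ h)
            exact hxe (le_antisymm hxy this)
        have hcard : (x :: y :: u).toFinset.card = (y :: u).toFinset.card + 1 := by
          simp only [List.toFinset_cons]
          rw [Finset.card_insert_of_notMem (by simpa [List.mem_toFinset] using hxnot)]
        simp only [List.isEmpty_cons, decide_not] at ihr ⊢
        rw [hcard, ← ihr]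
        simp [hxe]
        omega

-- ===== VERDICT (by name: the statement is the Claim_ definition above) =====
theorem count_different_characters_spec : Claim_equal_count_different_characters := by
  intro password _
  unfold Spec_count_different_characters count_different_characters count_different_characters_alt
  simp only [PySem.List.slice_from_one]
  set l := password.toList with hl
  set cs := PySem.List.sorted l (fun c => c) false with hcs
  have hpw : cs.Pairwise (· ≤ ·) := by
    simpa using PySem.List.sorted_pairwise l (fun c => c)
  have hB := pvB_count cs hpw
  rw [List.toFinset_eq_of_perm _ _ (PySem.List.sorted_perm l (fun c => c) false)] at hB
  have hA := pvA_length l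
  have hint : ((if cs.isEmpty then (0:Int) else 1) + (((cs.zip cs.tail).countP fun p => p.1 ≠ p.2 : ℕ) : Int)) = (l.toFinset.card : Int) := by
    rw [← hB]
    push_cast
    split_ifs <;> simp
  rw [hA, hint]
  by_cases h : 3 ≤ l.toFinset.card
  · rw [if_pos h]
    symm
    rw [decide_eq_true_iff]
    exact_mod_cast h
  · rw [if_neg h]
    symm
    rw [decide_eq_false_iff_not]
    intro hc
    exact h (by exact_mod_cast hc)
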